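-- pv_equiv track=rewrite | github.com/ServiceLayerNetworking/SLATE | global-controller/optimizer_header.py | calc_max_load_of_each_callgraph
-- ===== SOURCE A (Python) =====
-- def calc_max_load_of_each_callgraph(callgraph, maxload):
--     per_svc_max_load = dict()
--     for key in callgraph:
--         for svc in callgraph[key]:
--             if svc not in per_svc_max_load:
--                 per_svc_max_load[svc] = dict()
--             per_svc_max_load[svc][key] = maxload[key]
--
--     for key in callgraph:
--         for svc in per_svc_max_load:
--             if svc not in callgraph[key]:
--                 per_svc_max_load[svc][key] = 0
--     return per_svc_max_load
-- ===== SOURCE B (Python) =====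
-- def calc_max_load_of_each_callgraph(callgraph, maxload):
--     # one up-front universe of services, then each row built independently in one conditional sweep
--     services = list(dict.fromkeys(s for svcs in callgraph.values() for s in svcs))
--     return {
--         svc: {**{k: maxload[k] for k in callgraph if svc in callgraph[k]},
--               **{k: 0 for k in callgraph if svc not in callgraph[k]}}
--         for svc in services
--     }
-- ===== Notes on version B (the rewrite author's own statement) =====
-- stated objective: alternative
-- what changed: A fills the nested dict in two separate full sweeps over the callgraph (mutating rows with the real loads, then a second sweep zero-filling the gaps); B computes the set of services up front and builds each service's row independently in one conditional pass over the callgraph.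
import Mathlib
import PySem

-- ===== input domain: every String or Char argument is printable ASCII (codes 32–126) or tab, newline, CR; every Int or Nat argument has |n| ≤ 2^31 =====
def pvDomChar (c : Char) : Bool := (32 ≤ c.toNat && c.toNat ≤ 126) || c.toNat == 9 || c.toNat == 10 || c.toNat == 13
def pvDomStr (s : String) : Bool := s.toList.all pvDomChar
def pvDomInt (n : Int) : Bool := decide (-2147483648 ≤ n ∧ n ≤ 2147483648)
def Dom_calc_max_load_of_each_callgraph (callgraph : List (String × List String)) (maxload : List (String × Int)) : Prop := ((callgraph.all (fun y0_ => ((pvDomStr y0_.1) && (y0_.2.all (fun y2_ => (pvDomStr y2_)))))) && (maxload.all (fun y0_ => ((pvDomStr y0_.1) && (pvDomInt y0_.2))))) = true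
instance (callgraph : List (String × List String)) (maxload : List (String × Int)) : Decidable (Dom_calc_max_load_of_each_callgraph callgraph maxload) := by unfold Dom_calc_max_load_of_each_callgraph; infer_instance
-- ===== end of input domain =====

-- B replaces A's two separate full sweeps (fill non-zero cells, then a second sweep zero-filling the gaps)
-- by computing the service universe once and building each service's row independently in a single
-- conditional pass; objective: alternative decomposition (equal asymptotic cost).

-- ===== PORT A =====
-- The Python takes dicts; the assoc-list arguments are read as dicts (PySem.Dict.ofList),
-- and 'for key in callgraph: … callgraph[key] …' is the fold over cg.items (its keys are unique).
def pvA_step1 (ml : PySem.Dict String Int) (acc : PySem.Dict String (PySem.Dict String Int))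
    (kv : String × List String) : PySem.Dict String (PySem.Dict String Int) :=
  kv.2.foldl (fun a svc =>
    -- 'if svc not in per_svc_max_load: per_svc_max_load[svc] = dict()' then 'per_svc_max_load[svc][key] = maxload[key]'
    a.insert svc ((if a.contains svc then a.getD svc PySem.Dict.empty else PySem.Dict.empty).insert kv.1 (ml.getD kv.1 0))) acc

def pvA_step2 (acc : PySem.Dict String (PySem.Dict String Int))
    (kv : String × List String) : PySem.Dict String (PySem.Dict String Int) :=
  acc.keys.foldl (fun a svc =>
    if kv.2.contains svc then a
    else a.insert svc ((a.getD svc PySem.Dict.empty).insert kv.1 0)) acc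

def calc_max_load_of_each_callgraph (callgraph : List (String × List String)) (maxload : List (String × Int)) : List (String × List (String × Int)) :=
  let cg := PySem.Dict.ofList callgraph
  let ml := PySem.Dict.ofList maxload
  let pass1 := cg.items.foldl (pvA_step1 ml) PySem.Dict.empty
  let pass2 := cg.items.foldl pvA_step2 pass1
  pass2.items.map (fun p => (p.1, p.2.items))

-- ===== PORT B =====
def calc_max_load_of_each_callgraph_alt (callgraph : List (String × List String)) (maxload : List (String × Int)) : List (String × List (String × Int)) :=
  let cg := PySem.Dict.ofList callgraph
  let ml := PySem.Dict.ofList maxload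
  let services := PySem.List.dedup (cg.items.flatMap (fun kv => kv.2))
  services.map (fun svc =>
    (svc,
      (cg.items.filter (fun kv => kv.2.contains svc)).map (fun kv => (kv.1, ml.getD kv.1 0)) ++
      (cg.items.filter (fun kv => !kv.2.contains svc)).map (fun kv => (kv.1, (0:Int)))))

-- ===== PRECONDITION & SPEC =====
-- Pre_ excludes exactly the inputs where the Python A raises KeyError: a callgraph key with a
-- nonempty service list (read through the dict the assoc list denotes) that is absent from maxload.
def Pre_calc_max_load_of_each_callgraph (callgraph : List (String × List String)) (maxload : List (String × Int)) : Prop :=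
  ∀ kv ∈ (PySem.Dict.ofList callgraph).items, kv.2 ≠ [] → kv.1 ∈ maxload.map (fun p => p.1)
instance (callgraph : List (String × List String)) (maxload : List (String × Int)) : Decidable (Pre_calc_max_load_of_each_callgraph callgraph maxload) := by unfold Pre_calc_max_load_of_each_callgraph; infer_instance

def pvWitness_calc_max_load_of_each_callgraph : (List (String × List String)) × (List (String × Int)) :=
  ([("A", ["x", "y"]), ("B", ["y"]), ("C", [])], [("A", 7), ("B", 3), ("C", 5)])

def Spec_calc_max_load_of_each_callgraph (callgraph : List (String × List String)) (maxload : List (String × Int)) (out : List (String × List (String × Int))) : Prop := out = calc_max_load_of_each_callgraph_alt callgraph maxload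
instance (callgraph : List (String × List String)) (maxload : List (String × Int)) (out : List (String × List (String × Int))) : Decidable (Spec_calc_max_load_of_each_callgraph callgraph maxload out) := by unfold Spec_calc_max_load_of_each_callgraph; infer_instance

-- ===== CLAIM (what is proved, stated in full; the proofs are below) =====
def Claim_equal_calc_max_load_of_each_callgraph : Prop := ∀ (callgraph : List (String × List String)) (maxload : List (String × Int)), Dom_calc_max_load_of_each_callgraph callgraph maxload → Pre_calc_max_load_of_each_callgraph callgraph maxload → Spec_calc_max_load_of_each_callgraph callgraph maxload (calc_max_load_of_each_callgraph callgraph maxload)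

-- ===== LEMMAS AND PROOFS =====

-- the guarded inner value of pass 1 is just getD (missing key defaults to the empty dict)
theorem pv_if_contains_getD (a : PySem.Dict String (PySem.Dict String Int)) (s : String) :
    (if a.contains s then a.getD s PySem.Dict.empty else PySem.Dict.empty) = a.getD s PySem.Dict.empty := by
  by_cases h : a.contains s
  · simp [h]
  · simp [h, PySem.Dict.getD_of_not_contains a PySem.Dict.empty (by simpa using h)]

-- effect of one pass-1 inner loop on a single row
theorem pv_foldl_insert_getD (ss : List String) (a : PySem.Dict String (PySem.Dict String Int))
    (k : String) (w : Int) (svc : String) :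
    ((ss.foldl (fun a s => a.insert s ((a.getD s PySem.Dict.empty).insert k w)) a).getD svc PySem.Dict.empty)
      = if svc ∈ ss then (a.getD svc PySem.Dict.empty).insert k w else a.getD svc PySem.Dict.empty := by
  induction ss generalizing a with
  | nil => simp
  | cons s ss ih =>
    simp only [List.foldl_cons, ih, PySem.Dict.getD_insert, List.mem_cons]
    by_cases hsv : svc = s
    · subst hsv
      by_cases hm : svc ∈ ss <;>
        simp [hm, PySem.Dict.insert_insert_self]
    · by_cases hm : svc ∈ ss <;> simp [hm, hsv]

-- keys appearing in a pass-1 row of svc come from callgraph pairs containing svc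
theorem pv_mk_insert_append {l : List (String × Int)} {k : String} {w : Int}
    (h : k ∉ l.map (fun p => p.1)) :
    (PySem.Dict.mk l).insert k w = PySem.Dict.mk (l ++ [(k, w)]) := by
  apply PySem.Dict.ext
  rw [PySem.Dict.items_insert_of_not_contains]
  rw [PySem.Dict.contains_eq_decide_mem_keys]
  simp only [PySem.Dict.keys]
  simpa using h

-- pass-1 rows: row of svc = the maxload entries of the callgraph pairs containing svc, in order
theorem pv_pass1_getD (ml : PySem.Dict String Int) (L : List (String × List String))
    (hnd : (L.map (fun p => p.1)).Nodup) (svc : String) :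
    ((L.foldl (pvA_step1 ml) PySem.Dict.empty).getD svc PySem.Dict.empty)
      = PySem.Dict.mk ((L.filter (fun kv => kv.2.contains svc)).map (fun kv => (kv.1, ml.getD kv.1 0))) := by
  induction L using List.reverseRecOn with
  | nil => rw [List.foldl_nil, PySem.Dict.getD_empty]; rfl
  | append_singleton L kv ih =>
    have hndL : (L.map (fun p => p.1)).Nodup := by
      simp only [List.map_append] at hnd
      exact (List.nodup_append.mp hnd).1
    have hk : kv.1 ∉ L.map (fun p => p.1) := by
      simp only [List.map_append, List.map_cons, List.map_nil] at hnd
      have hdisj := (List.nodup_append.mp hnd).2.2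
      intro hmem
      exact hdisj _ hmem kv.1 (by simp) rfl
    rw [List.foldl_append]
    simp only [List.foldl_cons, List.foldl_nil, pvA_step1, pv_if_contains_getD]
    rw [pv_foldl_insert_getD, ih hndL]
    by_cases hm : svc ∈ kv.2
    · have hc : kv.2.contains svc = true := by simpa using hm
      rw [if_pos hm, pv_mk_insert_append, List.filter_append]
      · simp [hm]
      · intro hmem
        apply hk
        simp only [List.map_map, List.mem_map] at hmem
        obtain ⟨p, hp, hpe⟩ := hmem
        exact List.mem_map.mpr ⟨p, List.mem_of_mem_filter hp, hpe⟩
    · have hc : kv.2.contains svc = false := by simpa using hm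
      rw [if_neg hm, List.filter_append]
      simp [hm]

-- pass-1 outer keys: the services in order of first appearance
theorem pv_pass1_keys (ml : PySem.Dict String Int) (L : List (String × List String))
    (d : PySem.Dict String (PySem.Dict String Int)) :
    (L.foldl (pvA_step1 ml) d).keys = PySem.Set.update d.keys (L.flatMap (fun kv => kv.2)) := by
  induction L generalizing d with
  | nil => simp
  | cons kv L ih =>
    rw [List.foldl_cons, ih]
    have hstep : (pvA_step1 ml d kv).keys = PySem.Set.update d.keys kv.2 := by
      simp only [pvA_step1]
      exact PySem.Dict.keys_foldl_insert kv.2 _ d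
    rw [hstep, List.flatMap_cons, PySem.Set.update_append]

theorem pv_pass1_keys_nodup (ml : PySem.Dict String Int) (L : List (String × List String))
    (d : PySem.Dict String (PySem.Dict String Int)) (h : d.keys.Nodup) :
    (L.foldl (pvA_step1 ml) d).keys.Nodup := by
  induction L generalizing d with
  | nil => exact h
  | cons kv L ih =>
    rw [List.foldl_cons]
    exact ih _ (PySem.Dict.nodup_keys_foldl_insert kv.2 _ d h)

-- pass-2 never adds or reorders outer keys
theorem pv_inner2_keys (ks : List String) (a : PySem.Dict String (PySem.Dict String Int))
    (kv : String × List String) (h : ∀ s ∈ ks, a.contains s = true) :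
    (ks.foldl (fun a svc => if kv.2.contains svc then a
      else a.insert svc ((a.getD svc PySem.Dict.empty).insert kv.1 0)) a).keys = a.keys := by
  induction ks generalizing a with
  | nil => rfl
  | cons s ks ih =>
    rw [List.foldl_cons]
    by_cases hc : kv.2.contains s
    · rw [if_pos hc]
      exact ih a (fun s' hs' => h s' (List.mem_cons_of_mem _ hs'))
    · rw [if_neg hc]
      have hcs : a.contains s = true := h s (List.mem_cons_self ..)
      rw [ih _ (fun s' hs' => by
        rw [PySem.Dict.contains_insert]
        simp [h s' (List.mem_cons_of_mem _ hs')])]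
      exact PySem.Dict.keys_insert_of_contains a _ hcs

theorem pv_step2_keys (a : PySem.Dict String (PySem.Dict String Int)) (kv : String × List String) :
    (pvA_step2 a kv).keys = a.keys := by
  exact pv_inner2_keys a.keys a kv (fun s hs => (PySem.Dict.contains_iff_mem_keys a s).mpr hs)

theorem pv_pass2_keys (Q : List (String × List String)) (d : PySem.Dict String (PySem.Dict String Int)) :
    (Q.foldl pvA_step2 d).keys = d.keys := by
  induction Q generalizing d with
  | nil => rfl
  | cons kv Q ih => rw [List.foldl_cons, ih, pv_step2_keys]

-- effect of one pass-2 inner loop on a single row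
theorem pv_inner2_getD (ks : List String) (a : PySem.Dict String (PySem.Dict String Int))
    (kv : String × List String) (svc : String) :
    ((ks.foldl (fun a svc => if kv.2.contains svc then a
        else a.insert svc ((a.getD svc PySem.Dict.empty).insert kv.1 0)) a).getD svc PySem.Dict.empty)
      = if svc ∈ ks ∧ ¬ svc ∈ kv.2 then (a.getD svc PySem.Dict.empty).insert kv.1 0
        else a.getD svc PySem.Dict.empty := by
  induction ks generalizing a with
  | nil => simp
  | cons s ks ih =>
    rw [List.foldl_cons]
    by_cases hc : kv.2.contains s
    · rw [if_pos hc, ih]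
      have hsm : s ∈ kv.2 := by simpa using hc
      by_cases hsv : svc = s
      · subst hsv; simp [hsm]
      · simp [hsv, List.mem_cons]
    · rw [if_neg hc, ih]
      have hsm : ¬ s ∈ kv.2 := by simpa using hc
      by_cases hsv : svc = s
      · subst hsv
        by_cases hm : svc ∈ ks <;>
          simp [hm, hsm, PySem.Dict.insert_insert_self]
      · by_cases hm : svc ∈ ks <;>
          simp [hm, hsv, PySem.Dict.getD_insert]


-- pass-2 rows over any nodup sub-prefix Q of L
theorem pv_pass2_getD (ml : PySem.Dict String Int) (L : List (String × List String))
    (hnd : (L.map (fun p => p.1)).Nodup) (Q : List (String × List String))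
    (hsub : ∀ q ∈ Q, q ∈ L) (hndQ : (Q.map (fun p => p.1)).Nodup) (svc : String)
    (hsvc : svc ∈ PySem.List.dedup (L.flatMap (fun kv => kv.2))) :
    ((Q.foldl pvA_step2 (L.foldl (pvA_step1 ml) PySem.Dict.empty)).getD svc PySem.Dict.empty)
      = PySem.Dict.mk
          ((L.filter (fun kv => kv.2.contains svc)).map (fun kv => (kv.1, ml.getD kv.1 0)) ++
           (Q.filter (fun kv => !kv.2.contains svc)).map (fun kv => (kv.1, (0:Int)))) := by
  induction Q using List.reverseRecOn with
  | nil => simpa using pv_pass1_getD ml L hnd svc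
  | append_singleton Q kv ih =>
    have hsubQ : ∀ q ∈ Q, q ∈ L := fun q hq => hsub q (List.mem_append_left _ hq)
    have hkvL : kv ∈ L := hsub kv (List.mem_append_right _ (List.mem_singleton.mpr rfl))
    have hndQ' : (Q.map (fun p => p.1)).Nodup := by
      have h := hndQ
      simp only [List.map_append] at h
      exact (List.nodup_append.mp h).1
    have hkQ : kv.1 ∉ Q.map (fun p => p.1) := by
      simp only [List.map_append, List.map_cons, List.map_nil] at hndQ
      have hdisj := (List.nodup_append.mp hndQ).2.2
      intro hmem
      exact hdisj _ hmem kv.1 (by simp) rfl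
    rw [List.foldl_append, List.foldl_cons, List.foldl_nil]
    simp only [pvA_step2]
    rw [pv_inner2_getD, ih hsubQ hndQ']
    have hkeys : (Q.foldl pvA_step2 (L.foldl (pvA_step1 ml) PySem.Dict.empty)).keys
        = PySem.List.dedup (L.flatMap (fun kv => kv.2)) := by
      rw [pv_pass2_keys, pv_pass1_keys]
      simp [PySem.Set.update_nil_left, PySem.List.dedup]
    by_cases hm : svc ∈ kv.2
    · have hc : kv.2.contains svc = true := by simpa using hm
      rw [if_neg (fun h => h.2 hm)]
      rw [List.filter_append]
      simp [hm]
    · have hc : kv.2.contains svc = false := by simpa using hm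
      rw [if_pos ⟨by rw [hkeys]; exact hsvc, hm⟩]
      rw [pv_mk_insert_append, List.filter_append]
      · simp [hm, List.append_assoc]
      · intro hmem
        rw [List.map_append, List.mem_append] at hmem
        rcases hmem with hmem | hmem
        · simp only [List.map_map, List.mem_map] at hmem
          obtain ⟨p, hp, hpe⟩ := hmem
          rw [List.mem_filter] at hp
          have heq : p = kv := List.inj_on_of_nodup_map (by simpa using hnd) hp.1 hkvL hpe
          subst heq
          exact absurd (by simpa using hp.2) hm
        · simp only [List.map_map, List.mem_map] at hmem
          obtain ⟨q, hq, hqe⟩ := hmem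
          exact hkQ (List.mem_map.mpr ⟨q, List.mem_of_mem_filter hq, hqe⟩)

-- ===== VERDICT (by name: the statement is the Claim_ definition above) =====
theorem calc_max_load_of_each_callgraph_spec : Claim_equal_calc_max_load_of_each_callgraph := by
  intro callgraph maxload _ _
  unfold Spec_calc_max_load_of_each_callgraph
  unfold calc_max_load_of_each_callgraph calc_max_load_of_each_callgraph_alt
  dsimp only
  set cg := PySem.Dict.ofList callgraph with hcg
  set ml := PySem.Dict.ofList maxload with hml
  have hnd : (cg.items.map (fun p => p.1)).Nodup := PySem.Dict.nodup_keys_ofList callgraph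
  have hkeys : (cg.items.foldl pvA_step2 (cg.items.foldl (pvA_step1 ml) PySem.Dict.empty)).keys
      = PySem.List.dedup (cg.items.flatMap (fun kv => kv.2)) := by
    rw [pv_pass2_keys, pv_pass1_keys]
    simp [PySem.Set.update_nil_left, PySem.List.dedup]
  have hndk : (cg.items.foldl pvA_step2 (cg.items.foldl (pvA_step1 ml) PySem.Dict.empty)).keys.Nodup := by
    rw [pv_pass2_keys]
    exact pv_pass1_keys_nodup ml cg.items PySem.Dict.empty (by simp)
  rw [PySem.Dict.items_eq_map_keys _ hndk PySem.Dict.empty, hkeys, List.map_map]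
  apply List.map_congr_left
  intro svc hsvc
  have := pv_pass2_getD ml cg.items hnd cg.items (fun q hq => hq) hnd svc hsvc
  simp only [Function.comp_apply, this]
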